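-- pv_equiv track=rewrite | github.com/vedantbhattad-11/A1_B4_61_DAA_TA | que3.py | solve_n_queens_with_blocks
-- ===== SOURCE A (Python) =====
-- def is_safe(board, row, col, n, blocked):
--     if (row, col) in blocked:
--         return False
--     for i in range(row):
--         if board[i] == col or abs(board[i] - col) == abs(i - row):
--             return False
--     return True
--
-- def solve_n_queens_with_blocks(n, blocked):
--     board = [-1] * n
--     solutions = []
--     def backtrack(row):
--         if row == n:
--             solutions.append([(i, board[i]) for i in range(n)])
--             return
--         for col in range(n):
--             if is_safe(board, row, col, n, blocked):
--                 board[row] = col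
--                 backtrack(row + 1)
--                 board[row] = -1
--     backtrack(0)
--     return solutions
-- ===== SOURCE B (Python) =====
-- def solve_n_queens_with_blocks(n, blocked):
--     blocked_set = set(blocked)
--     solutions = []
--     placed = []
--     cols = set()
--     d1 = set()
--     d2 = set()
--     def backtrack(row):
--         if row == n:
--             solutions.append(list(enumerate(placed)))
--             return
--         for col in range(n):
--             if ((row, col) in blocked_set or col in cols
--                     or (row - col) in d1 or (row + col) in d2):
--                 continue
--             placed.append(col)
--             cols.add(col); d1.add(row - col); d2.add(row + col)
--             backtrack(row + 1)
--             placed.pop()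
--             cols.discard(col); d1.discard(row - col); d2.discard(row + col)
--     backtrack(0)
--     return solutions
-- ===== Notes on version B (the rewrite author's own statement) =====
-- stated objective: alternative
-- what changed: B replaces A's per-candidate rescan of all previously placed queens (plus a linear scan of the blocked list) by a blocked-cell set and incremental column/diagonal sets maintained and undone along the backtracking; the exponential number of backtracking nodes still dominates, so a timing run shows no overall speed-up.
import Mathlib
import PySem

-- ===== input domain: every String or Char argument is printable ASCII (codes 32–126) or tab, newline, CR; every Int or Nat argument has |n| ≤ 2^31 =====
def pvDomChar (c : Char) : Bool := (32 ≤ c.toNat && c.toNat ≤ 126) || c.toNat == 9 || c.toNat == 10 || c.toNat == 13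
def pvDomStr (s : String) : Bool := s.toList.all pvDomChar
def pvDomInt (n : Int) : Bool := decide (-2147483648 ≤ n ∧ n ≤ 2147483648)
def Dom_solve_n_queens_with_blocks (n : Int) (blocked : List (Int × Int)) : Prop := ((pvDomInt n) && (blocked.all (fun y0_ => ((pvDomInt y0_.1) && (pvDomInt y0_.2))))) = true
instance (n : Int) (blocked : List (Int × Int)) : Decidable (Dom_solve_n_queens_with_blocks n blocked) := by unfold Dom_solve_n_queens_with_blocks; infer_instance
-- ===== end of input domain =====

-- B replaces A's per-candidate rescan of all previously placed queens by incremental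
-- column/diagonal sets maintained along the backtracking (a different safety-check
-- mechanism; same solutions in the same order — no overall speed-up is claimed).

-- ===== PORT A =====
def is_safe (board : List Int) (row : Int) (col : Int) (n : Int) (blocked : List (Int × Int)) : Bool :=
  if blocked.contains (row, col) then false
  else
    (PySem.List.pyRange 0 row 1).all (fun i =>
      !(PySem.List.pyGetD board i 0 == col
        || |PySem.List.pyGetD board i 0 - col| == |i - row|))

def btA (n : Int) (blocked : List (Int × Int)) : Nat → Int → List Int → List (List (Int × Int))
  | fuel, row, board =>
    if row = n then
      [(PySem.List.pyRange 0 n 1).map (fun i => (i, PySem.List.pyGetD board i 0))]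
    else
      match fuel with
      | 0 => []
      | f + 1 =>
        (PySem.List.pyRange 0 n 1).foldl
          (fun acc col =>
            if is_safe board row col n blocked then
              acc ++ btA n blocked f (row + 1) (PySem.List.pySetD board row col)
            else acc) []

def solve_n_queens_with_blocks (n : Int) (blocked : List (Int × Int)) : List (List (Int × Int)) :=
  btA n blocked n.toNat 0 (List.replicate n.toNat (-1))

-- ===== PORT B =====
-- backtrack(row) of Source B: placed/cols/d1/d2 are threaded functionally (the Python
-- pops/discards after each recursive call, restoring them); fuel = n - row.
def btB (n : Int) (blockedS : PySem.Set (Int × Int)) :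
    Nat → Int → List Int → PySem.Set Int → PySem.Set Int → PySem.Set Int → List (List (Int × Int))
  | fuel, row, placed, cols, dg1, dg2 =>
    if row = n then
      [PySem.List.enumerate placed 0]
    else
      match fuel with
      | 0 => []
      | f + 1 =>
        (PySem.List.pyRange 0 n 1).foldl
          (fun acc col =>
            if PySem.Set.contains blockedS (row, col) || PySem.Set.contains cols col
                || PySem.Set.contains dg1 (row - col) || PySem.Set.contains dg2 (row + col) then
              acc
            else
              acc ++ btB n blockedS f (row + 1) (placed ++ [col])
                (PySem.Set.add cols col) (PySem.Set.add dg1 (row - col))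
                (PySem.Set.add dg2 (row + col))) []

def solve_n_queens_with_blocks_alt (n : Int) (blocked : List (Int × Int)) : List (List (Int × Int)) :=
  btB n (PySem.Set.ofList blocked) n.toNat 0 [] PySem.Set.empty PySem.Set.empty PySem.Set.empty

-- ===== PRECONDITION & SPEC =====
def Spec_solve_n_queens_with_blocks (n : Int) (blocked : List (Int × Int)) (out : List (List (Int × Int))) : Prop := out = solve_n_queens_with_blocks_alt n blocked
instance (n : Int) (blocked : List (Int × Int)) (out : List (List (Int × Int))) : Decidable (Spec_solve_n_queens_with_blocks n blocked out) := by unfold Spec_solve_n_queens_with_blocks; infer_instance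

-- ===== CLAIM (what is proved, stated in full; the proofs are below) =====
def Claim_equal_solve_n_queens_with_blocks : Prop := ∀ (n : Int) (blocked : List (Int × Int)), Dom_solve_n_queens_with_blocks n blocked → Spec_solve_n_queens_with_blocks n blocked (solve_n_queens_with_blocks n blocked)

-- ===== LEMMAS AND PROOFS =====

-- the board A sees at row = placed.length: the placed columns, then untouched -1 cells
def pad (n : Int) (placed : List Int) : List Int :=
  placed ++ List.replicate (n.toNat - placed.length) (-1)

-- the diagonal keys of B's sets, as determined by the placed prefix
def d1Of (placed : List Int) : List Int :=
  (PySem.List.enumerate placed 0).map (fun p => p.1 - p.2)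
def d2Of (placed : List Int) : List Int :=
  (PySem.List.enumerate placed 0).map (fun p => p.1 + p.2)

-- A's O(row) scan of the board equals B's three set-membership tests
lemma cond_iff (placed : List Int) (col : Int) :
    (∀ (k : Nat) (hk : k < placed.length),
        placed[k] ≠ col ∧ |placed[k] - col| ≠ |(k : Int) - (placed.length : Int)|)
      ↔ (col ∉ placed ∧ ((placed.length : Int) - col) ∉ d1Of placed
          ∧ ((placed.length : Int) + col) ∉ d2Of placed) := by
  simp only [d1Of, d2Of, List.mem_map, PySem.List.mem_enumerate_iff, not_exists]
  constructor
  · intro h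
    refine ⟨?_, ?_, ?_⟩
    · intro hc
      obtain ⟨k, hk, hke⟩ := List.mem_iff_getElem.mp hc
      exact (h k hk).1 hke
    · rintro p ⟨⟨k, hk, rfl⟩, hpe⟩
      have habs := (h k hk).2
      simp only [zero_add] at hpe
      rw [Int.abs_eq_natAbs, Int.abs_eq_natAbs] at habs
      have : ¬ ((placed[k] - col).natAbs = ((k:Int) - (placed.length:Int)).natAbs) := by
        exact_mod_cast habs
      omega
    · rintro p ⟨⟨k, hk, rfl⟩, hpe⟩
      have habs := (h k hk).2
      simp only [zero_add] at hpe
      rw [Int.abs_eq_natAbs, Int.abs_eq_natAbs] at habs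
      have : ¬ ((placed[k] - col).natAbs = ((k:Int) - (placed.length:Int)).natAbs) := by
        exact_mod_cast habs
      omega
  · rintro ⟨h1, h2, h3⟩ k hk
    constructor
    · intro hc; exact h1 (List.mem_iff_getElem.mpr ⟨k, hk, hc⟩)
    · intro habs
      rw [Int.abs_eq_natAbs, Int.abs_eq_natAbs] at habs
      have habs' : (placed[k] - col).natAbs = ((k:Int) - (placed.length:Int)).natAbs := by
        exact_mod_cast habs
      rcases Int.natAbs_eq_natAbs_iff.mp habs' with he | he
      · exact h2 ((k:Int), placed[k]) ⟨⟨k, hk, by simp⟩, by omega⟩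
      · exact h3 ((k:Int), placed[k]) ⟨⟨k, hk, by simp⟩, by omega⟩

lemma safe_eq (n : Int) (blocked : List (Int × Int)) (placed : List Int) (col : Int) :
    is_safe (pad n placed) (placed.length : Int) col n blocked
      = !(PySem.Set.contains (PySem.Set.ofList blocked) ((placed.length : Int), col)
          || PySem.Set.contains placed col
          || PySem.Set.contains (d1Of placed) ((placed.length : Int) - col)
          || PySem.Set.contains (d2Of placed) ((placed.length : Int) + col)) := by
  have hset : PySem.Set.contains (PySem.Set.ofList blocked) ((placed.length : Int), col)
      = blocked.contains ((placed.length : Int), col) := by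
    simp [PySem.Set.contains, PySem.Set.mem_ofList, List.contains_eq_mem]
  rw [is_safe, hset, List.contains_eq_mem]
  by_cases hb : ((placed.length : Int), col) ∈ blocked
  · simp [hb]
  · simp only [hb, decide_false, Bool.false_or, Bool.false_eq_true, if_false]
    apply Bool.coe_iff_coe.mp
    simp only [List.all_eq_true, PySem.List.mem_pyRange_one, and_imp, Bool.not_eq_true',
      Bool.or_eq_false_iff, beq_eq_false_iff_ne, ne_eq, PySem.Set.contains,
      List.contains_eq_mem, decide_eq_false_iff_not]
    have hpg : ∀ (i : Int) (hi0 : 0 ≤ i) (hil : i.toNat < placed.length),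
        PySem.List.pyGetD (pad n placed) i 0 = placed[i.toNat] := by
      intro i hi0 hil
      rw [pad, PySem.List.pyGetD_eq_getElem _ _ hi0 (by simp; omega)]
      exact List.getElem_append_left (by omega)
    constructor
    · intro h
      have hc := (cond_iff placed col).mp (fun k hk => by
        have := h (k : Int) (by positivity) (by exact_mod_cast hk)
        rw [hpg (k : Int) (by positivity) (by simpa using hk)] at this
        simpa using this)
      exact ⟨⟨hc.1, hc.2.1⟩, hc.2.2⟩
    · intro h i hi0 hil
      rw [hpg i hi0 (by omega)]
      have := (cond_iff placed col).mpr ⟨h.1.1, h.1.2, h.2⟩ i.toNat (by omega)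
      constructor
      · exact this.1
      · have h2 := this.2
        rw [Int.toNat_of_nonneg hi0] at h2
        exact h2

lemma d1Of_append (placed : List Int) (c : Int) :
    d1Of (placed ++ [c]) = d1Of placed ++ [(placed.length : Int) - c] := by
  simp [d1Of, PySem.List.enumerate_append, PySem.List.enumerate_cons]

lemma d2Of_append (placed : List Int) (c : Int) :
    d2Of (placed ++ [c]) = d2Of placed ++ [(placed.length : Int) + c] := by
  simp [d2Of, PySem.List.enumerate_append, PySem.List.enumerate_cons]

lemma pad_set (n : Int) (placed : List Int) (c : Int)
    (h : placed.length < n.toNat) :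
    PySem.List.pySetD (pad n placed) (placed.length : Int) c = pad n (placed ++ [c]) := by
  have hrep : n.toNat - placed.length = (n.toNat - placed.length - 1) + 1 := by omega
  rw [PySem.List.pySetD_natCast, pad, hrep, List.replicate_succ]
  rw [pad]
  have : n.toNat - (placed ++ [c]).length = n.toNat - placed.length - 1 := by simp; omega
  rw [this]
  rw [List.set_append_right _ _ (le_refl _)]
  simp

-- the two backtracking recursions agree at every node, by induction on the remaining depth
lemma bt_eq (n : Int) (blocked : List (Int × Int)) (hn : 0 ≤ n) :
    ∀ (fuel : Nat) (placed : List Int), placed.length + fuel = n.toNat →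
      btA n blocked fuel (placed.length : Int) (pad n placed)
        = btB n (PySem.Set.ofList blocked) fuel (placed.length : Int) placed placed
            (d1Of placed) (d2Of placed) := by
  intro fuel
  induction fuel with
  | zero =>
    intro placed hlen
    have hrow : (placed.length : Int) = n := by omega
    rw [btA, btB, if_pos hrow, if_pos hrow]
    have hpad : pad n placed = placed := by simp [pad, show n.toNat - placed.length = 0 by omega]
    have hl : PySem.List.len placed = n := by
      simp [PySem.List.len_eq, hrow]
    rw [hpad, PySem.List.enumerate_eq_map_pyRange placed 0, hl]
  | succ f ih =>
    intro placed hlen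
    have hrow : (placed.length : Int) ≠ n := by omega
    rw [btA, btB, if_neg hrow, if_neg hrow]
    apply PySem.List.foldl_congr_mem
    intro acc col _
    rw [safe_eq n blocked placed col]
    by_cases hc : (PySem.Set.contains (PySem.Set.ofList blocked) ((placed.length : Int), col)
        || PySem.Set.contains placed col
        || PySem.Set.contains (d1Of placed) ((placed.length : Int) - col)
        || PySem.Set.contains (d2Of placed) ((placed.length : Int) + col))
    · rw [hc]; simp
    · rw [Bool.not_eq_true] at hc
      rw [hc]
      simp only [Bool.not_false, if_true, if_false, Bool.false_eq_true]
      congr 1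
      simp only [Bool.or_eq_false_iff] at hc
      obtain ⟨⟨⟨hb, hcol⟩, hd1⟩, hd2⟩ := hc
      simp only [PySem.Set.contains, List.contains_eq_mem, decide_eq_false_iff_not] at hcol hd1 hd2
      have hadd1 : PySem.Set.add placed col = placed ++ [col] := by
        simp [PySem.Set.add, PySem.Set.contains, hcol]
      have hadd2 : PySem.Set.add (d1Of placed) ((placed.length : Int) - col) = d1Of (placed ++ [col]) := by
        simp [PySem.Set.add, PySem.Set.contains, hd1, d1Of_append]
      have hadd3 : PySem.Set.add (d2Of placed) ((placed.length : Int) + col) = d2Of (placed ++ [col]) := by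
        simp [PySem.Set.add, PySem.Set.contains, hd2, d2Of_append]
      rw [hadd1, hadd2, hadd3, pad_set n placed col (by omega)]
      have := ih (placed ++ [col]) (by simp; omega)
      simpa using this

-- ===== VERDICT (by name: the statement is the Claim_ definition above) =====
theorem solve_n_queens_with_blocks_spec : Claim_equal_solve_n_queens_with_blocks := by
  intro n blocked _
  show solve_n_queens_with_blocks n blocked = solve_n_queens_with_blocks_alt n blocked
  by_cases hn : 0 ≤ n
  · have h := bt_eq n blocked hn n.toNat [] (by simp)
    simpa [solve_n_queens_with_blocks, solve_n_queens_with_blocks_alt, pad, d1Of, d2Of,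
      PySem.List.enumerate, PySem.Set.empty] using h
  · have hz : n.toNat = 0 := Int.toNat_of_nonpos (le_of_not_ge hn)
    have hne : (0 : Int) ≠ n := by omega
    simp [solve_n_queens_with_blocks, solve_n_queens_with_blocks_alt, btA, btB, hz, hne]
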